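-- pv_equiv track=rewrite | github.com/bavobbr/top-of-the-pops-agent | services/wikipedia.py | get_category_disambiguation_hints
-- ===== SOURCE A (Python) =====
-- def get_category_disambiguation_hints(category):
--     """Get disambiguation hints based on category type."""
--     if not category:
--         return []
--
--     category_lower = category.lower()
--
--     # Music-related categories
--     if any(term in category_lower for term in ['band', 'rock', 'pop', 'music', 'singer', 'artist', 'rapper', 'hip hop']):
--         return ['musician', 'band', 'singer', 'musical artist']
--
--     # Film/TV categories
--     if any(term in category_lower for term in ['movie', 'film', 'actor', 'actress', 'star', 'hollywood']):
--         return ['actor', 'actress', 'film', 'entertainer']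
--
--     # Sports categories
--     if any(term in category_lower for term in ['sport', 'athlete', 'player', 'olympic', 'champion', 'football', 'basketball', 'tennis']):
--         return ['athlete', 'sportsperson', 'player']
--
--     # Science/academic categories
--     if any(term in category_lower for term in ['scientist', 'physicist', 'nobel', 'inventor', 'researcher']):
--         return ['scientist', 'physicist', 'researcher']
--
--     # Historical/political categories
--     if any(term in category_lower for term in ['leader', 'president', 'monarch', 'king', 'queen', 'politician']):
--         return ['politician', 'leader', 'monarch']
--
--     return []
-- ===== SOURCE B (Python) =====
-- # Different algorithm: instead of testing each keyword with a substring search,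
-- # slide a window over the lowered category and hash-look each window up in a
-- # term -> (rule index, hints) dictionary, keeping the lowest-index matched rule.
-- _RULES = [
--     (['band', 'rock', 'pop', 'music', 'singer', 'artist', 'rapper', 'hip hop'],
--      ['musician', 'band', 'singer', 'musical artist']),
--     (['movie', 'film', 'actor', 'actress', 'star', 'hollywood'],
--      ['actor', 'actress', 'film', 'entertainer']),
--     (['sport', 'athlete', 'player', 'olympic', 'champion', 'football', 'basketball', 'tennis'],
--      ['athlete', 'sportsperson', 'player']),
--     (['scientist', 'physicist', 'nobel', 'inventor', 'researcher'],
--      ['scientist', 'physicist', 'researcher']),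
--     (['leader', 'president', 'monarch', 'king', 'queen', 'politician'],
--      ['politician', 'leader', 'monarch']),
-- ]
--
-- _TERM_RULE = {t: (i, hints) for i, (terms, hints) in enumerate(_RULES) for t in terms}
-- _LENGTHS = sorted({len(t) for t in _TERM_RULE})
--
--
-- def get_category_disambiguation_hints(category):
--     """Get disambiguation hints based on category type."""
--     if not category:
--         return []
--     cl = category.lower()
--     best = None
--     for i in range(len(cl)):
--         for L in _LENGTHS:
--             v = _TERM_RULE.get(cl[i:i + L])
--             if v is not None and (best is None or v[0] < best[0]):
--                 best = v
--     return best[1] if best is not None else []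
-- ===== Notes on version B (the rewrite author's own statement) =====
-- stated objective: alternative
-- what changed: Replaces per-keyword substring searches (any(term in category_lower ...) per rule, early return) with multi-pattern matching: every window of the lowered category whose length matches a keyword length is looked up in a term->(rule index, hints) dictionary built once, and a running minimum over matched rule indices reproduces first-rule-wins order.
import Mathlib
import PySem

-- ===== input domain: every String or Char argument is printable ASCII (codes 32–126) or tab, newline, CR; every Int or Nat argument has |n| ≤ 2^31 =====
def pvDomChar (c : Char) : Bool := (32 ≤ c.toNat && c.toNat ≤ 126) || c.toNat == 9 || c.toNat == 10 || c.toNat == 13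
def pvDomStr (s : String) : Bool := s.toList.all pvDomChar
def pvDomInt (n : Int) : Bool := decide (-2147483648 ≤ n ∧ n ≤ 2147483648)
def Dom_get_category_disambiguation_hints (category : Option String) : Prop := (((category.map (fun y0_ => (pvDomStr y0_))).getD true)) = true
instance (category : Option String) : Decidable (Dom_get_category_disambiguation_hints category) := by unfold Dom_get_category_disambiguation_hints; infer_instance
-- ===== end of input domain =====

-- B replaces A's per-keyword substring searches by sliding-window dictionary lookup:
-- each window of the lowered category whose length is a keyword length is looked up in a
-- term -> (rule index, hints) dict, and the lowest matched rule index wins (alternative).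

-- ===== PORT A =====
def get_category_disambiguation_hints (category : Option String) : List String :=
  match category with
  | none => []
  | some s =>
    if s = "" then []
    else
      let category_lower := PySem.Str.lower s
      if (["band", "rock", "pop", "music", "singer", "artist", "rapper", "hip hop"].any
            (fun term => PySem.Str.isIn term category_lower)) then
        ["musician", "band", "singer", "musical artist"]
      else if (["movie", "film", "actor", "actress", "star", "hollywood"].any
            (fun term => PySem.Str.isIn term category_lower)) then
        ["actor", "actress", "film", "entertainer"]
      else if (["sport", "athlete", "player", "olympic", "champion", "football", "basketball", "tennis"].any
            (fun term => PySem.Str.isIn term category_lower)) then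
        ["athlete", "sportsperson", "player"]
      else if (["scientist", "physicist", "nobel", "inventor", "researcher"].any
            (fun term => PySem.Str.isIn term category_lower)) then
        ["scientist", "physicist", "researcher"]
      else if (["leader", "president", "monarch", "king", "queen", "politician"].any
            (fun term => PySem.Str.isIn term category_lower)) then
        ["politician", "leader", "monarch"]
      else []

-- ===== PORT B =====
-- the module-level _RULES table of Source B
def pvRules : List (List String × List String) :=
  [ (["band", "rock", "pop", "music", "singer", "artist", "rapper", "hip hop"],
     ["musician", "band", "singer", "musical artist"]),
    (["movie", "film", "actor", "actress", "star", "hollywood"],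
     ["actor", "actress", "film", "entertainer"]),
    (["sport", "athlete", "player", "olympic", "champion", "football", "basketball", "tennis"],
     ["athlete", "sportsperson", "player"]),
    (["scientist", "physicist", "nobel", "inventor", "researcher"],
     ["scientist", "physicist", "researcher"]),
    (["leader", "president", "monarch", "king", "queen", "politician"],
     ["politician", "leader", "monarch"]) ]

-- _TERM_RULE = {t: (i, hints) for i, (terms, hints) in enumerate(_RULES) for t in terms}
def pvTermRule : PySem.Dict String (Int × List String) :=
  PySem.Dict.ofList ((PySem.List.enumerate pvRules).flatMap
    (fun p => p.2.1.map (fun t => (t, (p.1, p.2.2)))))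

-- _LENGTHS = sorted({len(t) for t in _TERM_RULE})
def pvLengths : List Int :=
  PySem.List.sorted (PySem.Set.ofList (pvTermRule.keys.map PySem.Str.len)) (fun x => x) false

def get_category_disambiguation_hints_alt (category : Option String) : List String :=
  match category with
  | none => []
  | some s =>
    if s = "" then []
    else
      let cl := PySem.Str.lower s
      let best := (PySem.List.pyRange 0 (PySem.Str.len cl) 1).foldl
        (fun best i => pvLengths.foldl
          (fun b L =>
            match PySem.Dict.get? pvTermRule (PySem.Str.slice cl (some i) (some (i + L))) with
            | some v =>
              match b with
              | none => some v
              | some b' => if v.1 < b'.1 then some v else some b'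
            | none => b) best) none
      match best with
      | none => []
      | some b => b.2

-- ===== PRECONDITION & SPEC =====
def Spec_get_category_disambiguation_hints (category : Option String) (out : List String) : Prop := out = get_category_disambiguation_hints_alt category
instance (category : Option String) (out : List String) : Decidable (Spec_get_category_disambiguation_hints category out) := by unfold Spec_get_category_disambiguation_hints; infer_instance

-- ===== CLAIM (what is proved, stated in full; the proofs are below) =====
def Claim_equal_get_category_disambiguation_hints : Prop := ∀ (category : Option String), Dom_get_category_disambiguation_hints category → Spec_get_category_disambiguation_hints category (get_category_disambiguation_hints category)


-- ===== LEMMAS AND PROOFS =====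

-- the running-minimum update of B's loop body
def pvUpd (b : Option (Int × List String)) (v : Int × List String) : Option (Int × List String) :=
  match b with
  | none => some v
  | some b' => if v.1 < b'.1 then some v else some b'

-- all windows B inspects, and the matched dict values
def pvWindows (cl : String) : List String :=
  (PySem.List.pyRange 0 (PySem.Str.len cl) 1).flatMap
    (fun i => pvLengths.map (fun L => PySem.Str.slice cl (some i) (some (i + L))))

def pvV (cl : String) : List (Int × List String) :=
  (pvWindows cl).filterMap (PySem.Dict.get? pvTermRule)

-- the five dict values
def pvTV : List (Int × List String) :=
  [ (0, ["musician", "band", "singer", "musical artist"]), (1, ["actor", "actress", "film", "entertainer"]), (2, ["athlete", "sportsperson", "player"]), (3, ["scientist", "physicist", "researcher"]), (4, ["politician", "leader", "monarch"]) ]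

theorem pv_fold_eq (cl : String) :
    (PySem.List.pyRange 0 (PySem.Str.len cl) 1).foldl
      (fun best i => pvLengths.foldl
        (fun b L =>
          match PySem.Dict.get? pvTermRule (PySem.Str.slice cl (some i) (some (i + L))) with
          | some v =>
            match b with
            | none => some v
            | some b' => if v.1 < b'.1 then some v else some b'
          | none => b) best) none
    = (pvV cl).foldl pvUpd none := by
  unfold pvV pvWindows
  rw [List.foldl_filterMap, List.foldl_flatMap]
  simp only [List.foldl_map]
  apply PySem.List.foldl_congr_mem
  intro acc i _
  apply PySem.List.foldl_congr_mem
  intro b L _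
  cases PySem.Dict.get? pvTermRule (PySem.Str.slice cl (some i) (some (i + L))) with
  | none => rfl
  | some v => rfl

-- what a get? hit on the term dict means
set_option maxRecDepth 40000 in
theorem pv_get?_table (w : String) (v : Int × List String) :
    PySem.Dict.get? pvTermRule w = some v ↔
      ((w ∈ ["band", "rock", "pop", "music", "singer", "artist", "rapper", "hip hop"] ∧ v = (0, ["musician", "band", "singer", "musical artist"])) ∨
       (w ∈ ["movie", "film", "actor", "actress", "star", "hollywood"] ∧ v = (1, ["actor", "actress", "film", "entertainer"])) ∨
       (w ∈ ["sport", "athlete", "player", "olympic", "champion", "football", "basketball", "tennis"] ∧ v = (2, ["athlete", "sportsperson", "player"])) ∨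
       (w ∈ ["scientist", "physicist", "nobel", "inventor", "researcher"] ∧ v = (3, ["scientist", "physicist", "researcher"])) ∨
       (w ∈ ["leader", "president", "monarch", "king", "queen", "politician"] ∧ v = (4, ["politician", "leader", "monarch"]))) := by
  rw [PySem.Dict.get?_eq_some_iff_mem_items _ _ _ (by decide)]
  have hit : pvTermRule.items =
      (["band", "rock", "pop", "music", "singer", "artist", "rapper", "hip hop"].map (fun t => (t, ((0 : Int), ["musician", "band", "singer", "musical artist"])))) ++
      (["movie", "film", "actor", "actress", "star", "hollywood"].map (fun t => (t, ((1 : Int), ["actor", "actress", "film", "entertainer"])))) ++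
      (["sport", "athlete", "player", "olympic", "champion", "football", "basketball", "tennis"].map (fun t => (t, ((2 : Int), ["athlete", "sportsperson", "player"])))) ++
      (["scientist", "physicist", "nobel", "inventor", "researcher"].map (fun t => (t, ((3 : Int), ["scientist", "physicist", "researcher"])))) ++
      (["leader", "president", "monarch", "king", "queen", "politician"].map (fun t => (t, ((4 : Int), ["politician", "leader", "monarch"])))) := by decide
  rw [hit]
  simp only [List.mem_append, List.mem_map, List.mem_cons, List.not_mem_nil, or_false,
    Prod.mk.injEq]
  constructor
  · rintro h
    rcases h with (((h | h) | h) | h) | h <;> rcases h with ⟨t, ht, h1, h2⟩ <;> subst h1 <;>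
      [exact Or.inl ⟨ht, h2.symm⟩;
       exact Or.inr (Or.inl ⟨ht, h2.symm⟩);
       exact Or.inr (Or.inr (Or.inl ⟨ht, h2.symm⟩));
       exact Or.inr (Or.inr (Or.inr (Or.inl ⟨ht, h2.symm⟩)));
       exact Or.inr (Or.inr (Or.inr (Or.inr ⟨ht, h2.symm⟩)))]
  · rintro (⟨ht, rfl⟩ | ⟨ht, rfl⟩ | ⟨ht, rfl⟩ | ⟨ht, rfl⟩ | ⟨ht, rfl⟩)
    · exact Or.inl (Or.inl (Or.inl (Or.inl ⟨w, ht, rfl, rfl⟩)))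
    · exact Or.inl (Or.inl (Or.inl (Or.inr ⟨w, ht, rfl, rfl⟩)))
    · exact Or.inl (Or.inl (Or.inr ⟨w, ht, rfl, rfl⟩))
    · exact Or.inl (Or.inr ⟨w, ht, rfl, rfl⟩)
    · exact Or.inr ⟨w, ht, rfl, rfl⟩

-- a term occurs among the windows iff it is a substring (given its length is a window length)
set_option maxRecDepth 40000 in
theorem pv_window_iff (cl t : String) (h1 : t.toList ≠ [])
    (h2 : ((t.toList.length : Int)) ∈ pvLengths) :
    t ∈ pvWindows cl ↔ PySem.Str.isIn t cl = true := by
  have hlen : PySem.Str.len cl = (cl.toList.length : Int) := by simp [pysem]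
  unfold pvWindows
  simp only [List.mem_flatMap, List.mem_map, PySem.List.mem_pyRange_one]
  constructor
  · rintro ⟨i, ⟨h0i, hilt⟩, L, hL, heq⟩
    rw [PySem.Str.isIn_iff_infix]
    have hLpos : (0 : Int) ≤ L := by
      have : ∀ x ∈ pvLengths, (0 : Int) ≤ x := by decide
      exact this L hL
    have := congrArg String.toList heq
    rw [PySem.Str.toList_slice, PySem.Chars.slice_eq_listSlice,
      PySem.List.slice_toNat _ h0i (by omega)] at this
    rw [← this]
    exact ((List.drop i.toNat cl.toList).take_prefix _).isInfix.trans
      (cl.toList.drop_suffix i.toNat).isInfix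
  · intro hin
    have hinf := (PySem.Str.isIn_iff_infix t cl).mp hin
    have hchars : PySem.Chars.isIn t.toList cl.toList = true :=
      (PySem.Chars.isIn_iff_infix _ _).mpr hinf
    obtain ⟨j, hj⟩ := (PySem.Chars.exists_prefix_drop_iff_isIn _ _).mpr hchars
    have hjlt : j < cl.toList.length := by
      by_contra hc
      rw [List.drop_eq_nil_of_le (Nat.le_of_not_lt hc)] at hj
      exact h1 (List.prefix_nil.mp hj)
    refine ⟨(j : Int), ⟨by exact_mod_cast Int.natCast_nonneg j, by rw [hlen]; exact_mod_cast hjlt⟩,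
      (t.toList.length : Int), h2, ?_⟩
    rw [← String.toList_inj, PySem.Str.toList_slice, PySem.Chars.slice_eq_listSlice,
      PySem.List.slice_natCast_add]
    exact (List.prefix_iff_eq_take.mp hj).symm

theorem pv_mem_V_iff (cl : String) (v : Int × List String) :
    v ∈ pvV cl ↔ ∃ t, PySem.Dict.get? pvTermRule t = some v ∧ PySem.Str.isIn t cl = true := by
  have hkey : ∀ p ∈ pvTermRule.items,
      p.1.toList ≠ [] ∧ ((p.1.toList.length : Int)) ∈ pvLengths := by decide
  unfold pvV
  rw [List.mem_filterMap]
  constructor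
  · rintro ⟨w, hw, hg⟩
    obtain ⟨hne, hlen⟩ := hkey _ (PySem.Dict.mem_items_of_get?_eq_some _ hg)
    exact ⟨w, hg, (pv_window_iff cl w hne hlen).mp hw⟩
  · rintro ⟨t, hg, hin⟩
    obtain ⟨hne, hlen⟩ := hkey _ (PySem.Dict.mem_items_of_get?_eq_some _ hg)
    exact ⟨t, (pv_window_iff cl t hne hlen).mpr hin, hg⟩

theorem pv_upd_ne_none (b : Option (Int × List String)) (v : Int × List String) :
    pvUpd b v ≠ none := by
  cases b with
  | none => simp [pvUpd]
  | some b' =>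
    have e : pvUpd (some b') v = if v.1 < b'.1 then some v else some b' := rfl
    rw [e]
    split <;> simp

theorem pv_foldl_upd_eq_none_iff (V : List (Int × List String)) (b : Option (Int × List String)) :
    V.foldl pvUpd b = none ↔ b = none ∧ V = [] := by
  induction V generalizing b with
  | nil => simp
  | cons x xs ih =>
    rw [List.foldl_cons, ih]
    simp [pv_upd_ne_none b x]

theorem pv_upd_eq_or (b : Option (Int × List String)) (x : Int × List String) :
    pvUpd b x = some x ∨ (∃ b', b = some b' ∧ pvUpd b x = some b') := by
  cases b with
  | none => exact Or.inl rfl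
  | some b' =>
    have e : pvUpd (some b') x = if x.1 < b'.1 then some x else some b' := rfl
    by_cases hlt : x.1 < b'.1
    · exact Or.inl (by rw [e, if_pos hlt])
    · exact Or.inr ⟨b', rfl, by rw [e, if_neg hlt]⟩

theorem pv_upd_le (b : Option (Int × List String)) (x c : Int × List String)
    (h : pvUpd b x = some c) : c.1 ≤ x.1 ∧ ∀ b', b = some b' → c.1 ≤ b'.1 := by
  cases b with
  | none =>
    have e : pvUpd none x = some x := rfl
    rw [e, Option.some.injEq] at h
    exact ⟨le_of_eq (by rw [h]), fun b' hb => by simp at hb⟩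
  | some b' =>
    have e : pvUpd (some b') x = if x.1 < b'.1 then some x else some b' := rfl
    rw [e] at h
    split_ifs at h with hlt <;> rw [Option.some.injEq] at h <;> subst h
    · exact ⟨le_refl _, fun b'' hb => by injection hb with hb; rw [← hb]; omega⟩
    · exact ⟨by omega, fun b'' hb => by injection hb with hb; rw [← hb]⟩

theorem pv_foldl_upd_mem (V : List (Int × List String)) (b : Option (Int × List String))
    (v : Int × List String) (h : V.foldl pvUpd b = some v) : b = some v ∨ v ∈ V := by
  induction V generalizing b with
  | nil => exact Or.inl h
  | cons x xs ih =>
    rw [List.foldl_cons] at h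
    rcases ih _ h with h' | h'
    · rcases pv_upd_eq_or b x with he | ⟨b', hb, he⟩
      · rw [he, Option.some.injEq] at h'
        right
        rw [← h']
        exact List.mem_cons_self
      · rw [he] at h'
        left
        rw [hb, h']
    · exact Or.inr (List.mem_cons_of_mem _ h')

theorem pv_foldl_upd_le (V : List (Int × List String)) (b : Option (Int × List String))
    (v : Int × List String) (h : V.foldl pvUpd b = some v) :
    (∀ b', b = some b' → v.1 ≤ b'.1) ∧ ∀ x ∈ V, v.1 ≤ x.1 := by
  induction V generalizing b with
  | nil =>
    rw [List.foldl_nil] at h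
    refine ⟨fun b' hb => ?_, fun x hx => absurd hx (by simp)⟩
    rw [hb, Option.some.injEq] at h
    exact le_of_eq (by rw [h])
  | cons x xs ih =>
    rw [List.foldl_cons] at h
    obtain ⟨h1, h2⟩ := ih _ h
    constructor
    · intro b' hb
      subst hb
      cases hc : pvUpd (some b') x with
      | none => exact absurd hc (pv_upd_ne_none _ _)
      | some c => exact le_trans (h1 c hc) ((pv_upd_le _ _ _ hc).2 b' rfl)
    · intro y hy
      rcases List.mem_cons.mp hy with rfl | hy'
      · cases hc : pvUpd b y with
        | none => exact absurd hc (pv_upd_ne_none _ _)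
        | some c => exact le_trans (h1 c hc) (pv_upd_le _ _ _ hc).1
      · exact h2 y hy'

-- per-rule membership characterisation
theorem pv_M0 (cl : String) :
    ((0 : Int), ["musician", "band", "singer", "musical artist"]) ∈ pvV cl ↔ (["band", "rock", "pop", "music", "singer", "artist", "rapper", "hip hop"].any (fun term => PySem.Str.isIn term cl)) = true := by
  rw [pv_mem_V_iff, List.any_eq_true]
  constructor
  · rintro ⟨t, hg, hin⟩
    rcases (pv_get?_table t _).mp hg with ⟨hm, hv⟩ | ⟨hm, hv⟩ | ⟨hm, hv⟩ | ⟨hm, hv⟩ | ⟨hm, hv⟩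
    · exact ⟨t, hm, hin⟩
    · exact absurd hv (by decide)
    · exact absurd hv (by decide)
    · exact absurd hv (by decide)
    · exact absurd hv (by decide)
  · rintro ⟨t, hm, hin⟩
    exact ⟨t, (pv_get?_table t _).mpr (Or.inl ⟨hm, rfl⟩), hin⟩

theorem pv_M1 (cl : String) :
    ((1 : Int), ["actor", "actress", "film", "entertainer"]) ∈ pvV cl ↔ (["movie", "film", "actor", "actress", "star", "hollywood"].any (fun term => PySem.Str.isIn term cl)) = true := by
  rw [pv_mem_V_iff, List.any_eq_true]
  constructor
  · rintro ⟨t, hg, hin⟩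
    rcases (pv_get?_table t _).mp hg with ⟨hm, hv⟩ | ⟨hm, hv⟩ | ⟨hm, hv⟩ | ⟨hm, hv⟩ | ⟨hm, hv⟩
    · exact absurd hv (by decide)
    · exact ⟨t, hm, hin⟩
    · exact absurd hv (by decide)
    · exact absurd hv (by decide)
    · exact absurd hv (by decide)
  · rintro ⟨t, hm, hin⟩
    exact ⟨t, (pv_get?_table t _).mpr (Or.inr (Or.inl ⟨hm, rfl⟩)), hin⟩

theorem pv_M2 (cl : String) :
    ((2 : Int), ["athlete", "sportsperson", "player"]) ∈ pvV cl ↔ (["sport", "athlete", "player", "olympic", "champion", "football", "basketball", "tennis"].any (fun term => PySem.Str.isIn term cl)) = true := by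
  rw [pv_mem_V_iff, List.any_eq_true]
  constructor
  · rintro ⟨t, hg, hin⟩
    rcases (pv_get?_table t _).mp hg with ⟨hm, hv⟩ | ⟨hm, hv⟩ | ⟨hm, hv⟩ | ⟨hm, hv⟩ | ⟨hm, hv⟩
    · exact absurd hv (by decide)
    · exact absurd hv (by decide)
    · exact ⟨t, hm, hin⟩
    · exact absurd hv (by decide)
    · exact absurd hv (by decide)
  · rintro ⟨t, hm, hin⟩
    exact ⟨t, (pv_get?_table t _).mpr (Or.inr (Or.inr (Or.inl ⟨hm, rfl⟩))), hin⟩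

theorem pv_M3 (cl : String) :
    ((3 : Int), ["scientist", "physicist", "researcher"]) ∈ pvV cl ↔ (["scientist", "physicist", "nobel", "inventor", "researcher"].any (fun term => PySem.Str.isIn term cl)) = true := by
  rw [pv_mem_V_iff, List.any_eq_true]
  constructor
  · rintro ⟨t, hg, hin⟩
    rcases (pv_get?_table t _).mp hg with ⟨hm, hv⟩ | ⟨hm, hv⟩ | ⟨hm, hv⟩ | ⟨hm, hv⟩ | ⟨hm, hv⟩
    · exact absurd hv (by decide)
    · exact absurd hv (by decide)
    · exact absurd hv (by decide)
    · exact ⟨t, hm, hin⟩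
    · exact absurd hv (by decide)
  · rintro ⟨t, hm, hin⟩
    exact ⟨t, (pv_get?_table t _).mpr (Or.inr (Or.inr (Or.inr (Or.inl ⟨hm, rfl⟩)))), hin⟩

theorem pv_M4 (cl : String) :
    ((4 : Int), ["politician", "leader", "monarch"]) ∈ pvV cl ↔ (["leader", "president", "monarch", "king", "queen", "politician"].any (fun term => PySem.Str.isIn term cl)) = true := by
  rw [pv_mem_V_iff, List.any_eq_true]
  constructor
  · rintro ⟨t, hg, hin⟩
    rcases (pv_get?_table t _).mp hg with ⟨hm, hv⟩ | ⟨hm, hv⟩ | ⟨hm, hv⟩ | ⟨hm, hv⟩ | ⟨hm, hv⟩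
    · exact absurd hv (by decide)
    · exact absurd hv (by decide)
    · exact absurd hv (by decide)
    · exact absurd hv (by decide)
    · exact ⟨t, hm, hin⟩
  · rintro ⟨t, hm, hin⟩
    exact ⟨t, (pv_get?_table t _).mpr (Or.inr (Or.inr (Or.inr (Or.inr ⟨hm, rfl⟩)))), hin⟩

theorem pv_V_sub_TV (cl : String) : ∀ v ∈ pvV cl, v ∈ pvTV := by
  intro v hv
  obtain ⟨t, hg, _⟩ := (pv_mem_V_iff cl v).mp hv
  have hall : ∀ p ∈ pvTermRule.items, p.2 ∈ pvTV := by decide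
  exact hall _ (PySem.Dict.mem_items_of_get?_eq_some _ hg)

-- the heart: A's if-chain equals B's running-minimum result
theorem pv_main (cl : String) :
    (if (["band", "rock", "pop", "music", "singer", "artist", "rapper", "hip hop"].any (fun term => PySem.Str.isIn term cl)) = true then ["musician", "band", "singer", "musical artist"]
     else if (["movie", "film", "actor", "actress", "star", "hollywood"].any (fun term => PySem.Str.isIn term cl)) = true then ["actor", "actress", "film", "entertainer"]
     else if (["sport", "athlete", "player", "olympic", "champion", "football", "basketball", "tennis"].any (fun term => PySem.Str.isIn term cl)) = true then ["athlete", "sportsperson", "player"]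
     else if (["scientist", "physicist", "nobel", "inventor", "researcher"].any (fun term => PySem.Str.isIn term cl)) = true then ["scientist", "physicist", "researcher"]
     else if (["leader", "president", "monarch", "king", "queen", "politician"].any (fun term => PySem.Str.isIn term cl)) = true then ["politician", "leader", "monarch"]
     else []) =
    (match (pvV cl).foldl pvUpd none with
     | none => []
     | some b => b.2) := by
  have hmemV : ∀ v, (pvV cl).foldl pvUpd none = some v → v ∈ pvV cl := by
    intro v h
    rcases pv_foldl_upd_mem _ _ _ h with h' | h'
    · exact absurd h' (by simp)
    · exact h'
  by_cases g0 : (["band", "rock", "pop", "music", "singer", "artist", "rapper", "hip hop"].any (fun term => PySem.Str.isIn term cl)) = true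
  · rw [if_pos g0]
    have hmem := (pv_M0 cl).mpr g0
    cases hres : (pvV cl).foldl pvUpd none with
    | none => exact absurd ((pv_foldl_upd_eq_none_iff _ _).mp hres).2 (List.ne_nil_of_mem hmem)
    | some v =>
      have hle := (pv_foldl_upd_le _ _ _ hres).2 _ hmem
      have hTV := pv_V_sub_TV cl v (hmemV v hres)
      have hv : v = ((0 : Int), ["musician", "band", "singer", "musical artist"]) := by
        simp only [pvTV, List.mem_cons, List.not_mem_nil, or_false] at hTV
        rcases hTV with rfl | rfl | rfl | rfl | rfl <;> first | rfl | (revert hle; decide)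
      rw [hv]
  · rw [if_neg g0]
    by_cases g1 : (["movie", "film", "actor", "actress", "star", "hollywood"].any (fun term => PySem.Str.isIn term cl)) = true
    · rw [if_pos g1]
      have hmem := (pv_M1 cl).mpr g1
      cases hres : (pvV cl).foldl pvUpd none with
      | none => exact absurd ((pv_foldl_upd_eq_none_iff _ _).mp hres).2 (List.ne_nil_of_mem hmem)
      | some v =>
        have hle := (pv_foldl_upd_le _ _ _ hres).2 _ hmem
        have hTV := pv_V_sub_TV cl v (hmemV v hres)
        have hv : v = ((1 : Int), ["actor", "actress", "film", "entertainer"]) := by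
          simp only [pvTV, List.mem_cons, List.not_mem_nil, or_false] at hTV
          rcases hTV with rfl | rfl | rfl | rfl | rfl
          · exact absurd ((pv_M0 cl).mp (hmemV _ hres)) g0
          · rfl
          all_goals (revert hle; decide)
        rw [hv]
    · rw [if_neg g1]
      by_cases g2 : (["sport", "athlete", "player", "olympic", "champion", "football", "basketball", "tennis"].any (fun term => PySem.Str.isIn term cl)) = true
      · rw [if_pos g2]
        have hmem := (pv_M2 cl).mpr g2
        cases hres : (pvV cl).foldl pvUpd none with
        | none => exact absurd ((pv_foldl_upd_eq_none_iff _ _).mp hres).2 (List.ne_nil_of_mem hmem)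
        | some v =>
          have hle := (pv_foldl_upd_le _ _ _ hres).2 _ hmem
          have hTV := pv_V_sub_TV cl v (hmemV v hres)
          have hv : v = ((2 : Int), ["athlete", "sportsperson", "player"]) := by
            simp only [pvTV, List.mem_cons, List.not_mem_nil, or_false] at hTV
            rcases hTV with rfl | rfl | rfl | rfl | rfl
            · exact absurd ((pv_M0 cl).mp (hmemV _ hres)) g0
            · exact absurd ((pv_M1 cl).mp (hmemV _ hres)) g1
            · rfl
            all_goals (revert hle; decide)
          rw [hv]
      · rw [if_neg g2]
        by_cases g3 : (["scientist", "physicist", "nobel", "inventor", "researcher"].any (fun term => PySem.Str.isIn term cl)) = true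
        · rw [if_pos g3]
          have hmem := (pv_M3 cl).mpr g3
          cases hres : (pvV cl).foldl pvUpd none with
          | none => exact absurd ((pv_foldl_upd_eq_none_iff _ _).mp hres).2 (List.ne_nil_of_mem hmem)
          | some v =>
            have hle := (pv_foldl_upd_le _ _ _ hres).2 _ hmem
            have hTV := pv_V_sub_TV cl v (hmemV v hres)
            have hv : v = ((3 : Int), ["scientist", "physicist", "researcher"]) := by
              simp only [pvTV, List.mem_cons, List.not_mem_nil, or_false] at hTV
              rcases hTV with rfl | rfl | rfl | rfl | rfl
              · exact absurd ((pv_M0 cl).mp (hmemV _ hres)) g0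
              · exact absurd ((pv_M1 cl).mp (hmemV _ hres)) g1
              · exact absurd ((pv_M2 cl).mp (hmemV _ hres)) g2
              · rfl
              · revert hle; decide
            rw [hv]
        · rw [if_neg g3]
          by_cases g4 : (["leader", "president", "monarch", "king", "queen", "politician"].any (fun term => PySem.Str.isIn term cl)) = true
          · rw [if_pos g4]
            have hmem := (pv_M4 cl).mpr g4
            cases hres : (pvV cl).foldl pvUpd none with
            | none => exact absurd ((pv_foldl_upd_eq_none_iff _ _).mp hres).2 (List.ne_nil_of_mem hmem)
            | some v =>
              have hTV := pv_V_sub_TV cl v (hmemV v hres)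
              have hv : v = ((4 : Int), ["politician", "leader", "monarch"]) := by
                simp only [pvTV, List.mem_cons, List.not_mem_nil, or_false] at hTV
                rcases hTV with rfl | rfl | rfl | rfl | rfl
                · exact absurd ((pv_M0 cl).mp (hmemV _ hres)) g0
                · exact absurd ((pv_M1 cl).mp (hmemV _ hres)) g1
                · exact absurd ((pv_M2 cl).mp (hmemV _ hres)) g2
                · exact absurd ((pv_M3 cl).mp (hmemV _ hres)) g3
                · rfl
              rw [hv]
          · rw [if_neg g4]
            have hnil : pvV cl = [] := by
              rw [List.eq_nil_iff_forall_not_mem]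
              intro v hv
              have hTV := pv_V_sub_TV cl v hv
              simp only [pvTV, List.mem_cons, List.not_mem_nil, or_false] at hTV
              rcases hTV with rfl | rfl | rfl | rfl | rfl
              · exact g0 ((pv_M0 cl).mp hv)
              · exact g1 ((pv_M1 cl).mp hv)
              · exact g2 ((pv_M2 cl).mp hv)
              · exact g3 ((pv_M3 cl).mp hv)
              · exact g4 ((pv_M4 cl).mp hv)
            rw [hnil]
            rfl

-- ===== VERDICT (by name: the statement is the Claim_ definition above) =====
theorem get_category_disambiguation_hints_spec : Claim_equal_get_category_disambiguation_hints := by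
  intro category _
  unfold Spec_get_category_disambiguation_hints get_category_disambiguation_hints
    get_category_disambiguation_hints_alt
  cases category with
  | none => rfl
  | some s =>
    by_cases hs : s = ""
    · simp [hs]
    · simp only [hs, if_false]
      rw [pv_fold_eq (PySem.Str.lower s)]
      exact pv_main (PySem.Str.lower s)
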